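-- pv_equiv track=rewrite | github.com/D0hwQ1/Cyber-Guardians-Assignment | Week1/00_manuscrypt.py | decrypt_str
-- ===== SOURCE A (Python) =====
-- def decrypt_str(obf_str):
--     des = list(obf_str)
--     des_str = ""
--     for i in des:
--         other = ord(i)
--         if other < ord("i") or other > ord("p"):
--             if other < ord("r") or other > ord("y"):
--                 if other < ord("I") or other > ord("P"):
--                     if other < ord("R") and other > ord("Y"):
--                         other -= 9
--                         des_str += chr(other)
--                     else : des_str += chr(other)
--                 else:
--                     other += 9
--                     des_str += chr(other)
--             else:
--                 other -= 9
--                 des_str += chr(other)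
--         else:
--             other += 9
--             des_str += chr(other)
--     return des_str
-- ===== SOURCE B (Python) =====
-- _TABLE = {}
-- for _c in range(ord('i'), ord('p') + 1):
--     _TABLE[chr(_c)] = chr(_c + 9)
-- for _c in range(ord('r'), ord('y') + 1):
--     _TABLE[chr(_c)] = chr(_c - 9)
-- for _c in range(ord('I'), ord('P') + 1):
--     _TABLE[chr(_c)] = chr(_c + 9)
--
--
-- def decrypt_str(obf_str):
--     return "".join(_TABLE.get(ch, ch) for ch in obf_str)
-- ===== Notes on version B (the rewrite author's own statement) =====
-- stated objective: idiomatic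
-- what changed: Replaces the nested range-check if-cascade (whose uppercase R-Y branch is dead code since its condition can never hold) by a shift table precomputed once at module load, then a single dict lookup-with-default joined over the input.
import Mathlib
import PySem

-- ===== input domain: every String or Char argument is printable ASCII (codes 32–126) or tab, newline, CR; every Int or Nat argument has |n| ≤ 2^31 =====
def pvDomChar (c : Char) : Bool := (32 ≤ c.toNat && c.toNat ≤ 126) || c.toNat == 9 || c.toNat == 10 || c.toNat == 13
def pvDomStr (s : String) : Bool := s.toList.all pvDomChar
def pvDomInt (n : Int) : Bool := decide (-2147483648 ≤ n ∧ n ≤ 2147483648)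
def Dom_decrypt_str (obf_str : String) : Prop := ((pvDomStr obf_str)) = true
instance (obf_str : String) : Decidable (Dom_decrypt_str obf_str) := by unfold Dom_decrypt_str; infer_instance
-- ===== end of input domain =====

-- B replaces A's nested range-check cascade (with a dead uppercase R–Y branch) by a
-- precomputed shift table and a single lookup-with-default pass (objective: idiomatic).

-- ===== PORT A =====
-- one iteration of A's for-loop: the nested if-cascade, appending to des_str (as List Char)
def decryptStepA (des_str : List Char) (i : Char) : List Char :=
  let other := i.toNat
  if other < 'i'.toNat ∨ other > 'p'.toNat then
    if other < 'r'.toNat ∨ other > 'y'.toNat then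
      if other < 'I'.toNat ∨ other > 'P'.toNat then
        if other < 'R'.toNat ∧ other > 'Y'.toNat then
          des_str ++ [Char.ofNat (other - 9)]
        else des_str ++ [Char.ofNat other]
      else des_str ++ [Char.ofNat (other + 9)]
    else des_str ++ [Char.ofNat (other - 9)]
  else des_str ++ [Char.ofNat (other + 9)]

def decrypt_str (obf_str : String) : String :=
  let des := obf_str.toList
  String.mk (des.foldl decryptStepA ([] : List Char))

-- ===== PORT B =====
-- the module-level table: three range loops inserting shifted characters
def decryptTable : PySem.Dict Char Char :=
  let d := (PySem.List.pyRange ('i'.toNat : Int) (('p'.toNat : Int) + 1) 1).foldl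
    (fun d c => d.insert (Char.ofNat c.toNat) (Char.ofNat (c + 9).toNat)) PySem.Dict.empty
  let d := (PySem.List.pyRange ('r'.toNat : Int) (('y'.toNat : Int) + 1) 1).foldl
    (fun d c => d.insert (Char.ofNat c.toNat) (Char.ofNat (c - 9).toNat)) d
  (PySem.List.pyRange ('I'.toNat : Int) (('P'.toNat : Int) + 1) 1).foldl
    (fun d c => d.insert (Char.ofNat c.toNat) (Char.ofNat (c + 9).toNat)) d

def decrypt_str_alt (obf_str : String) : String :=
  String.mk (obf_str.toList.map (fun ch => decryptTable.getD ch ch))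

-- ===== PRECONDITION & SPEC =====
def Spec_decrypt_str (obf_str : String) (out : String) : Prop := out = decrypt_str_alt obf_str
instance (obf_str : String) (out : String) : Decidable (Spec_decrypt_str obf_str out) := by unfold Spec_decrypt_str; infer_instance

-- ===== CLAIM (what is proved, stated in full; the proofs are below) =====
def Claim_equal_decrypt_str : Prop := ∀ (obf_str : String), Dom_decrypt_str obf_str → Spec_decrypt_str obf_str (decrypt_str obf_str)

-- ===== LEMMAS AND PROOFS =====

-- the per-character results agree on every ASCII codepoint (decided by enumeration)
set_option maxRecDepth 8192 in
theorem step_eq_lookup_ofNat : ∀ n : Nat, n < 127 →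
    decryptStepA [] (Char.ofNat n) = [decryptTable.getD (Char.ofNat n) (Char.ofNat n)] := by
  decide

theorem step_eq_lookup (c : Char) (h : pvDomChar c = true) :
    decryptStepA [] c = [decryptTable.getD c c] := by
  have hn : c.toNat < 127 := by
    simp only [pvDomChar, Bool.or_eq_true, Bool.and_eq_true, decide_eq_true_eq, beq_iff_eq] at h
    omega
  have := step_eq_lookup_ofNat c.toNat hn
  rwa [Char.ofNat_toNat] at this

theorem stepA_append (acc : List Char) (c : Char) :
    decryptStepA acc c = acc ++ decryptStepA [] c := by
  simp only [decryptStepA]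
  split_ifs <;> simp

theorem foldl_eq_map (l : List Char) (acc : List Char)
    (h : l.all pvDomChar = true) :
    l.foldl decryptStepA acc = acc ++ l.map (fun ch => decryptTable.getD ch ch) := by
  induction l generalizing acc with
  | nil => simp
  | cons c t ih =>
    simp only [List.all_cons, Bool.and_eq_true] at h
    simp only [List.foldl_cons, List.map_cons]
    rw [ih _ h.2, stepA_append, step_eq_lookup c h.1]
    simp

-- ===== VERDICT (by name: the statement is the Claim_ definition above) =====
theorem decrypt_str_spec : Claim_equal_decrypt_str := by
  intro s hdom
  unfold Spec_decrypt_str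
  simp only [decrypt_str, decrypt_str_alt]
  rw [foldl_eq_map _ _ hdom]
  simp
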